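-- pv_equiv track=rewrite | github.com/Alba3k/reserv_system_mendo | bookings/views.py | final_check
-- ===== SOURCE A (Python) =====
-- def final_check(lst, res_time):
--     free_room_num = []
--     for row in lst:
--         if res_time.isdisjoint(row) == True:
--             free_room_num.append('open')
--         else:
--             free_room_num.append('close')
--     if free_room_num.count('close') > 0:
--         res = False
--     else:
--         res = True
--     return res
-- ===== SOURCE B (Python) =====
-- def final_check(lst, res_time):
--     return res_time.isdisjoint(set().union(*lst))
-- ===== Notes on version B (the rewrite author's own statement) =====
-- stated objective: simpler
-- what changed: Instead of labelling each row 'open'/'close' in a list and then counting 'close' labels, B merges all rows into one set up front and performs a single disjointness check against that union.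
import Mathlib
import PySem

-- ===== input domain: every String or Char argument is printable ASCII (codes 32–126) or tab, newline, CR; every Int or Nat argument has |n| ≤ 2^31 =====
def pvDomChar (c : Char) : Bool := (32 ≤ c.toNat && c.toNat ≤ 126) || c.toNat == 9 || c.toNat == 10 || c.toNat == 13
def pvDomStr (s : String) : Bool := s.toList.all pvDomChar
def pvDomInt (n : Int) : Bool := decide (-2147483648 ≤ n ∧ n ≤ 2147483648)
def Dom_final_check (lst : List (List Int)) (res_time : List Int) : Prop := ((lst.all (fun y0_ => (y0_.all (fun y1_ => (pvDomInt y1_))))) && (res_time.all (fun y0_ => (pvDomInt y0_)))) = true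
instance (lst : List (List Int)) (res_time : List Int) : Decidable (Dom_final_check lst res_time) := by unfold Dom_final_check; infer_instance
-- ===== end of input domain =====

-- B replaces A's per-row open/close label list and count with one union set and a single disjointness check (simpler).

-- ===== PORT A =====
def final_check (lst : List (List Int)) (res_time : List Int) : Bool :=
  let free_room_num : List String :=
    lst.foldl (fun acc row =>
      if PySem.Set.isdisjoint res_time row = true then acc ++ ["open"]
      else acc ++ ["close"]) []
  if PySem.List.count free_room_num "close" > 0 then false else true

-- ===== PORT B =====
def final_check_alt (lst : List (List Int)) (res_time : List Int) : Bool :=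
  PySem.Set.isdisjoint res_time
    (lst.foldl (fun u row => PySem.Set.union u row) PySem.Set.empty)

-- ===== PRECONDITION & SPEC =====
def Spec_final_check (lst : List (List Int)) (res_time : List Int) (out : Bool) : Prop := out = final_check_alt lst res_time
instance (lst : List (List Int)) (res_time : List Int) (out : Bool) : Decidable (Spec_final_check lst res_time out) := by unfold Spec_final_check; infer_instance

-- ===== CLAIM (what is proved, stated in full; the proofs are below) =====
def Claim_equal_final_check : Prop := ∀ (lst : List (List Int)) (res_time : List Int), Dom_final_check lst res_time → Spec_final_check lst res_time (final_check lst res_time)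

-- ===== LEMMAS AND PROOFS =====

-- A's loop: count of "close" labels = number of rows not disjoint from res_time
theorem pv_countClose (res_time : List Int) (lst : List (List Int)) (acc : List String) :
    List.count "close"
      (lst.foldl (fun acc row =>
        if PySem.Set.isdisjoint res_time row = true then acc ++ ["open"]
        else acc ++ ["close"]) acc)
    = List.count "close" acc
      + lst.countP (fun row => !PySem.Set.isdisjoint res_time row) := by
  induction lst generalizing acc with
  | nil => simp
  | cons r t ih =>
    simp only [List.foldl_cons, ih, List.countP_cons]
    by_cases h : PySem.Set.isdisjoint res_time r = true
    · simp [h]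
    · simp only [Bool.not_eq_true] at h
      simp [h]
      omega

-- B's union: membership in the accumulated union
theorem pv_mem_foldl_union (lst : List (List Int)) (u : List Int) (x : Int) :
    x ∈ lst.foldl (fun u row => PySem.Set.union u row) u ↔ x ∈ u ∨ ∃ row ∈ lst, x ∈ row := by
  induction lst generalizing u with
  | nil => simp
  | cons r t ih =>
    simp only [List.foldl_cons, ih, PySem.Set.mem_union, List.mem_cons]
    constructor
    · rintro ((h|h)|⟨row,hr,hx⟩)
      · exact Or.inl h
      · exact Or.inr ⟨r, Or.inl rfl, h⟩
      · exact Or.inr ⟨row, Or.inr hr, hx⟩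
    · rintro (h|⟨row,(rfl|hr),hx⟩)
      · exact Or.inl (Or.inl h)
      · exact Or.inl (Or.inr hx)
      · exact Or.inr ⟨row, hr, hx⟩

-- ===== VERDICT (by name: the statement is the Claim_ definition above) =====
theorem final_check_spec : Claim_equal_final_check := by
  intro lst res_time _
  unfold Spec_final_check final_check final_check_alt
  simp only [PySem.List.count_eq, pv_countClose]
  by_cases hall : ∀ row ∈ lst, PySem.Set.isdisjoint res_time row = true
  · have hc : lst.countP (fun row => !PySem.Set.isdisjoint res_time row) = 0 := by
      rw [List.countP_eq_zero]
      intro r hr; simp [hall r hr]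
    have hd : PySem.Set.isdisjoint res_time
        (lst.foldl (fun u row => PySem.Set.union u row) PySem.Set.empty) = true := by
      rw [PySem.Set.isdisjoint_iff]
      intro x hx hmem
      rcases (pv_mem_foldl_union lst PySem.Set.empty x).1 hmem with h | ⟨row, hrow, hxr⟩
      · simp [PySem.Set.empty] at h
      · exact ((PySem.Set.isdisjoint_iff _ _).1 (hall row hrow)) x hx hxr
    rw [hd]
    split_ifs with h
    · exfalso
      simp only [hc, List.count_nil, add_zero, gt_iff_lt, lt_self_iff_false] at h
    · rfl
  · push Not at hall
    obtain ⟨r, hr, hnd⟩ := hall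
    have hc : lst.countP (fun row => !PySem.Set.isdisjoint res_time row) ≠ 0 := by
      rw [Ne, List.countP_eq_zero]
      intro h
      exact absurd (h r hr) (by simp [hnd])
    have hd : PySem.Set.isdisjoint res_time
        (lst.foldl (fun u row => PySem.Set.union u row) PySem.Set.empty) = false := by
      rw [Bool.eq_false_iff]
      intro h
      apply hnd
      rw [PySem.Set.isdisjoint_iff] at h ⊢
      intro x hx hxr
      exact h x hx ((pv_mem_foldl_union lst PySem.Set.empty x).2 (Or.inr ⟨r, hr, hxr⟩))
    rw [hd]
    split_ifs with h
    · rfl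
    · exfalso
      simp only [List.count_nil, zero_add, gt_iff_lt, not_lt] at h
      omega
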